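-- pv_equiv track=rewrite | github.com/BenjiDayan/national_cipher_challenge | basics.py | word_handler
-- ===== SOURCE A (Python) =====
-- alphabet = ['a', 'b', 'c', 'd', 'e', 'f', 'g', 'h', 'i', 'j', 'k', 'l', 'm', \
--             'n', 'o', 'p', 'q', 'r', 's', 't', 'u', 'v', 'w', 'x', 'y', 'z']
--
-- def clean(text):
--     #Removes punctuation, makes everything lower case
--     cleaned_text = ''
--     for char in text:
--         if char.lower() in alphabet:
--             cleaned_text += char.lower()
--     return(cleaned_text)
--
-- def word_handler(text):
--     foo = text.split(' ')
--     bad_nums = []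
--     for num in range(len(foo)):
--         if '\n' in foo[num]:
--             foo += foo[num].split('\n\n')
--             bad_nums.append(num)
--
--
--     out = []
--     for num in range(len(foo)):
--         if not num in bad_nums:
--             out.append(clean(foo[num]))
--
--     return(out)
-- ===== SOURCE B (Python) =====
-- def clean(text):
--     letters = 'abcdefghijklmnopqrstuvwxyz'
--     return ''.join(c for c in text.lower() if c in letters)
--
-- def word_handler(text):
--     good = []
--     expanded = []
--     for w in text.split(' '):
--         if '\n' in w:
--             expanded.extend(clean(p) for p in w.split('\n\n'))
--         else:
--             good.append(clean(w))
--     return good + expanded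
-- ===== Notes on version B (the rewrite author's own statement) =====
-- stated objective: faster
-- what changed: Single pass over the space-split words, partitioning them into a list of cleaned good words and a list of cleaned expansion pieces, which removes the bad_nums index table, the second index-scanning loop and its per-index linear membership test over bad_nums.
import Mathlib
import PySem

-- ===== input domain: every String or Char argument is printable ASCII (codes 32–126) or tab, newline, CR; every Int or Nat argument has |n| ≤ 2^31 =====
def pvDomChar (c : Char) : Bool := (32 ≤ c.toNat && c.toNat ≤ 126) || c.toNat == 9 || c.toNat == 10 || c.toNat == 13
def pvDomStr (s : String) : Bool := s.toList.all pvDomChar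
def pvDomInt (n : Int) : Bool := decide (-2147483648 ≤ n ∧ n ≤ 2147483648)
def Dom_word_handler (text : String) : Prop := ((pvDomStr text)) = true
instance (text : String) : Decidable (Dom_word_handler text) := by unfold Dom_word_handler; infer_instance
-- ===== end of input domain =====

-- B replaces A's grown list + bad_nums index table + second index scan by one pass that
-- partitions the split words into clean good words and clean expansion pieces (objective: simpler).

-- ===== PORT A =====
-- Python's alphabet (a list of one-character strings) as its characters.
def pvAlphabet : List Char :=
  ['a','b','c','d','e','f','g','h','i','j','k','l','m',
   'n','o','p','q','r','s','t','u','v','w','x','y','z']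

-- clean(text): keep lowercase letters, building the string left to right.
def pvCleanA (w : List Char) : List Char :=
  w.foldl (fun acc c =>
    if PySem.Chars.lowerChar c ∈ pvAlphabet then acc ++ [PySem.Chars.lowerChar c] else acc) []

-- foo[num] is always in range in A, so pyGetD's default [] is never used.
def word_handler (text : String) : List String :=
  let foo := PySem.Chars.splitOn text.toList [' ']
  let st := (PySem.List.pyRange 0 foo.length 1).foldl
      (fun (st : List (List Char) × List Int) num =>
        if PySem.Chars.isIn ['\n'] (PySem.List.pyGetD st.1 num []) then
          (st.1 ++ PySem.Chars.splitOn (PySem.List.pyGetD st.1 num []) ['\n','\n'], st.2 ++ [num])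
        else st)
      (foo, [])
  (PySem.List.pyRange 0 st.1.length 1).foldl
      (fun (out : List String) num =>
        if st.2.contains num then out
        else out ++ [String.ofList (pvCleanA (PySem.List.pyGetD st.1 num []))])
      []

-- ===== PORT B =====
def pvLetters : List Char := "abcdefghijklmnopqrstuvwxyz".toList

-- clean(text) in B: ''.join(c for c in text.lower() if c in letters)  ('c in letters' is Python substring test)
def pvCleanB (w : List Char) : String :=
  String.ofList ((PySem.Chars.lower w).filter (fun c => PySem.Chars.isIn [c] pvLetters))

def word_handler_alt (text : String) : List String :=
  let st := (PySem.Chars.splitOn text.toList [' ']).foldl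
      (fun (st : List String × List String) w =>
        if PySem.Chars.isIn ['\n'] w then
          (st.1, st.2 ++ (PySem.Chars.splitOn w ['\n','\n']).map pvCleanB)
        else
          (st.1 ++ [pvCleanB w], st.2))
      ([], [])
  st.1 ++ st.2

-- ===== PRECONDITION & SPEC =====
def Spec_word_handler (text : String) (out : List String) : Prop := out = word_handler_alt text
instance (text : String) (out : List String) : Decidable (Spec_word_handler text out) := by unfold Spec_word_handler; infer_instance

-- ===== CLAIM (what is proved, stated in full; the proofs are below) =====
def Claim_equal_word_handler : Prop := ∀ (text : String), Dom_word_handler text → Spec_word_handler text (word_handler text)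

-- ===== LEMMAS AND PROOFS =====

def pvNL (w : List Char) : Bool := PySem.Chars.isIn ['\n'] w
def pvSplit2 (w : List Char) : List (List Char) := PySem.Chars.splitOn w ['\n','\n']
def pvExp (ws : List (List Char)) : List (List Char) := (ws.filter pvNL).flatMap pvSplit2
def pvBad : Nat → List (List Char) → List Int
  | _, [] => []
  | k, w :: d => if pvNL w then (k : Int) :: pvBad (k+1) d else pvBad (k+1) d

lemma pvRangeNat (n : Nat) :
    PySem.List.pyRange 0 (n : Int) 1 = (List.range n).map (fun (k : Nat) => (k : Int)) := by
  rw [PySem.List.pyRange_of_pos _ _ (by norm_num)]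
  rcases Nat.eq_zero_or_pos n with h|h
  · simp [h]
  · have h' : (0:Int) < n := by exact_mod_cast h
    simp only [if_pos h', zero_add]
    norm_num

lemma singleton_infix (c : Char) (l : List Char) : [c] <:+: l ↔ c ∈ l := by
  constructor
  · intro h; exact h.mem (by simp)
  · intro h
    obtain ⟨s, t, rfl⟩ := List.append_of_mem h
    exact ⟨s, t, by simp⟩

lemma cleanA_acc (w : List Char) : ∀ acc : List Char,
    w.foldl (fun acc c =>
      if PySem.Chars.lowerChar c ∈ pvAlphabet then acc ++ [PySem.Chars.lowerChar c] else acc) acc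
    = acc ++ (w.map PySem.Chars.lowerChar).filter (fun c => decide (c ∈ pvAlphabet)) := by
  induction w with
  | nil => simp
  | cons c w ih =>
    intro acc
    simp only [List.foldl_cons, List.map_cons, List.filter_cons]
    by_cases h : PySem.Chars.lowerChar c ∈ pvAlphabet
    · simp [h, ih]
    · simp [h, ih]

lemma isIn_singleton_letters (c : Char) :
    PySem.Chars.isIn [c] pvLetters = decide (c ∈ pvAlphabet) := by
  have hl : pvLetters = pvAlphabet := by decide
  rw [Bool.eq_iff_iff]
  simp [PySem.Chars.isIn_iff_infix, singleton_infix, hl]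

lemma mk_cleanA_eq_cleanB (w : List Char) : String.ofList (pvCleanA w) = pvCleanB w := by
  unfold pvCleanA pvCleanB
  rw [cleanA_acc]
  congr 1
  simp only [PySem.Chars.lower]
  rw [List.nil_append]
  exact List.filter_congr (fun x _ => (isIn_singleton_letters x).symm)

lemma mem_pvBad (d : List (List Char)) : ∀ (k : Nat) (x : Int),
    x ∈ pvBad k d ↔ ∃ j : Nat, x = ((k + j : Nat) : Int) ∧ j < d.length ∧ pvNL (d.getD j []) = true := by
  induction d with
  | nil => simp [pvBad]
  | cons w d ih =>
    intro k x
    by_cases hw : pvNL w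
    · simp only [pvBad, if_pos hw, List.mem_cons, ih]
      constructor
      · rintro (rfl | ⟨j, rfl, hj, hN⟩)
        · exact ⟨0, by simp, by simp, by simpa using hw⟩
        · exact ⟨j+1, by rw [show k + (j+1) = (k+1)+j by omega],
            by simp; omega, by simpa using hN⟩
      · rintro ⟨j, rfl, hj, hN⟩
        cases j with
        | zero => left; simp
        | succ j =>
          right
          exact ⟨j, by rw [show (k+1)+j = k + (j+1) by omega],
            by simp at hj; omega, by simpa using hN⟩
    · simp only [pvBad, if_neg hw, ih]
      constructor
      · rintro ⟨j, rfl, hj, hN⟩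
        exact ⟨j+1, by rw [show k + (j+1) = (k+1)+j by omega],
          by simp; omega, by simpa using hN⟩
      · rintro ⟨j, rfl, hj, hN⟩
        cases j with
        | zero => simp at hN; exact absurd hN hw
        | succ j =>
          exact ⟨j, by rw [show (k+1)+j = k + (j+1) by omega],
            by simp at hj; omega, by simpa using hN⟩

lemma loop1 (d : List (List Char)) : ∀ (k : Nat) (ws pre : List (List Char)) (acc : List Int),
    ws.drop k = d →
    ((List.range' k d.length).map (fun (i : Nat) => (i : Int))).foldl
      (fun (st : List (List Char) × List Int) num =>
        if PySem.Chars.isIn ['\n'] (PySem.List.pyGetD st.1 num []) then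
          (st.1 ++ PySem.Chars.splitOn (PySem.List.pyGetD st.1 num []) ['\n','\n'], st.2 ++ [num])
        else st)
      (ws ++ pre, acc)
    = (ws ++ (pre ++ pvExp d), acc ++ pvBad k d) := by
  induction d with
  | nil => intro k ws pre acc h; simp [pvExp, pvBad]
  | cons w d ih =>
    intro k ws pre acc h
    have hk : k < ws.length := by
      by_contra hk
      rw [List.drop_eq_nil_of_le (le_of_not_gt hk)] at h
      simp at h
    obtain ⟨hw, hd⟩ := List.cons_eq_cons.mp ((List.drop_eq_getElem_cons hk).symm.trans h)
    have hget : PySem.List.pyGetD (ws ++ pre) ((k : Nat) : Int) [] = w := by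
      rw [PySem.List.pyGetD_natCast, List.getD_append _ _ _ _ hk,
        List.getD_eq_getElem _ _ hk, hw]
    simp only [List.length_cons, List.range'_succ, List.map_cons, List.foldl_cons, hget]
    by_cases hNL : pvNL w = true
    · rw [if_pos (by simpa [pvNL] using hNL)]
      rw [show (ws ++ pre) ++ PySem.Chars.splitOn w ['\n','\n'] = ws ++ (pre ++ pvSplit2 w) by
        simp [pvSplit2, List.append_assoc]]
      rw [ih (k+1) ws (pre ++ pvSplit2 w) (acc ++ [((k:Nat):Int)]) hd]
      simp [pvExp, pvBad, List.filter_cons, hNL, List.append_assoc]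
    · rw [if_neg (by simpa [pvNL] using hNL)]
      rw [ih (k+1) ws pre acc hd]
      simp [pvExp, pvBad, List.filter_cons, hNL]

lemma bad_contains_eq (ws : List (List Char)) (k : Nat) (hk : k < ws.length) :
    (pvBad 0 ws).contains ((k : Nat) : Int) = pvNL (ws.getD k []) := by
  by_cases h : pvNL (ws.getD k []) = true
  · rw [h]
    rw [List.contains_iff_mem.mpr ((mem_pvBad ws 0 _).mpr ⟨k, by simp, hk, h⟩)]
  · rw [Bool.not_eq_true] at h
    rw [h]
    rw [Bool.eq_false_iff]
    intro hc
    obtain ⟨j, hj, _, hN⟩ := (mem_pvBad ws 0 _).mp (List.contains_iff_mem.mp hc)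
    have : k = j := by omega
    rw [this] at h
    rw [h] at hN
    exact Bool.noConfusion hN

lemma bad_not_contains (ws : List (List Char)) (k : Nat) (hk : ws.length ≤ k) :
    (pvBad 0 ws).contains ((k : Nat) : Int) = false := by
  rw [Bool.eq_false_iff]
  intro hc
  obtain ⟨j, hj, hlt, _⟩ := (mem_pvBad ws 0 _).mp (List.contains_iff_mem.mp hc)
  have : k = j := by omega
  omega

lemma loop2a (ws E : List (List Char)) (d : List (List Char)) :
    ∀ (k : Nat) (acc : List String),
    ws.drop k = d →
    ((List.range' k d.length).map (fun (i : Nat) => (i : Int))).foldl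
      (fun (out : List String) num =>
        if (pvBad 0 ws).contains num then out
        else out ++ [String.ofList (pvCleanA (PySem.List.pyGetD (ws ++ E) num []))])
      acc
    = acc ++ (d.filter (fun w => !pvNL w)).map (fun w => String.ofList (pvCleanA w)) := by
  induction d with
  | nil => intro k acc h; simp
  | cons w d ih =>
    intro k acc h
    have hk : k < ws.length := by
      by_contra hk
      rw [List.drop_eq_nil_of_le (le_of_not_gt hk)] at h
      simp at h
    obtain ⟨hw, hd⟩ := List.cons_eq_cons.mp ((List.drop_eq_getElem_cons hk).symm.trans h)
    have hget : PySem.List.pyGetD (ws ++ E) ((k : Nat) : Int) [] = w := by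
      rw [PySem.List.pyGetD_natCast, List.getD_append _ _ _ _ hk,
        List.getD_eq_getElem _ _ hk, hw]
    have hcont : (pvBad 0 ws).contains ((k : Nat) : Int) = pvNL w := by
      rw [bad_contains_eq ws k hk, List.getD_eq_getElem _ _ hk, hw]
    simp only [List.length_cons, List.range'_succ, List.map_cons, List.foldl_cons, hget, hcont]
    by_cases hNL : pvNL w = true
    · rw [if_pos hNL]
      rw [ih (k+1) acc hd]
      simp [List.filter_cons, hNL]
    · rw [Bool.not_eq_true] at hNL
      rw [if_neg (by simp [hNL])]
      rw [ih (k+1) (acc ++ [String.ofList (pvCleanA w)]) hd]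
      simp [List.filter_cons, hNL]

lemma loop2b (ws E : List (List Char)) (d : List (List Char)) :
    ∀ (k : Nat) (acc : List String),
    ws.length ≤ k → (ws ++ E).drop k = d →
    ((List.range' k d.length).map (fun (i : Nat) => (i : Int))).foldl
      (fun (out : List String) num =>
        if (pvBad 0 ws).contains num then out
        else out ++ [String.ofList (pvCleanA (PySem.List.pyGetD (ws ++ E) num []))])
      acc
    = acc ++ d.map (fun w => String.ofList (pvCleanA w)) := by
  induction d with
  | nil => intro k acc _ _; simp
  | cons w d ih =>
    intro k acc hle h
    have hk : k < (ws ++ E).length := by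
      by_contra hk
      rw [List.drop_eq_nil_of_le (le_of_not_gt hk)] at h
      simp at h
    obtain ⟨hw, hd⟩ := List.cons_eq_cons.mp ((List.drop_eq_getElem_cons hk).symm.trans h)
    have hget : PySem.List.pyGetD (ws ++ E) ((k : Nat) : Int) [] = w := by
      rw [PySem.List.pyGetD_natCast, List.getD_eq_getElem _ _ hk, hw]
    have hcont : (pvBad 0 ws).contains ((k : Nat) : Int) = false := bad_not_contains ws k hle
    simp only [List.length_cons, List.range'_succ, List.map_cons, List.foldl_cons, hget, hcont,
      Bool.false_eq_true, if_false]
    rw [ih (k+1) (acc ++ [String.ofList (pvCleanA w)]) (by omega) hd]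
    simp

lemma loop_alt (ws : List (List Char)) : ∀ (g e : List String),
    ws.foldl
      (fun (st : List String × List String) w =>
        if PySem.Chars.isIn ['\n'] w then
          (st.1, st.2 ++ (PySem.Chars.splitOn w ['\n','\n']).map pvCleanB)
        else
          (st.1 ++ [pvCleanB w], st.2))
      (g, e)
    = (g ++ (ws.filter (fun w => !pvNL w)).map pvCleanB,
       e ++ (ws.filter pvNL).flatMap (fun w => (pvSplit2 w).map pvCleanB)) := by
  induction ws with
  | nil => intro g e; simp
  | cons w ws ih =>
    intro g e
    simp only [List.foldl_cons]
    by_cases hNL : pvNL w = true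
    · rw [if_pos (by simpa [pvNL] using hNL)]
      rw [ih]
      simp [List.filter_cons, hNL, pvSplit2, List.append_assoc]
    · rw [if_neg (by simpa [pvNL] using hNL)]
      rw [ih]
      simp [List.filter_cons, hNL, List.append_assoc]

lemma main_eq (ws : List (List Char)) :
    (let st := (PySem.List.pyRange 0 (ws.length : Int) 1).foldl
        (fun (st : List (List Char) × List Int) num =>
          if PySem.Chars.isIn ['\n'] (PySem.List.pyGetD st.1 num []) then
            (st.1 ++ PySem.Chars.splitOn (PySem.List.pyGetD st.1 num []) ['\n','\n'],
             st.2 ++ [num])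
          else st)
        (ws, [])
     (PySem.List.pyRange 0 (st.1.length : Int) 1).foldl
        (fun (out : List String) num =>
          if st.2.contains num then out
          else out ++ [String.ofList (pvCleanA (PySem.List.pyGetD st.1 num []))])
        [])
    =
    (let st := ws.foldl
        (fun (st : List String × List String) w =>
          if PySem.Chars.isIn ['\n'] w then
            (st.1, st.2 ++ (PySem.Chars.splitOn w ['\n','\n']).map pvCleanB)
          else
            (st.1 ++ [pvCleanB w], st.2))
        ([], [])
     st.1 ++ st.2) := by
  have h1 : (PySem.List.pyRange 0 (ws.length : Int) 1).foldl
      (fun (st : List (List Char) × List Int) num =>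
        if PySem.Chars.isIn ['\n'] (PySem.List.pyGetD st.1 num []) then
          (st.1 ++ PySem.Chars.splitOn (PySem.List.pyGetD st.1 num []) ['\n','\n'],
           st.2 ++ [num])
        else st)
      (ws, [])
      = (ws ++ pvExp ws, pvBad 0 ws) := by
    have h := loop1 ws 0 ws [] [] (by simp)
    rw [pvRangeNat, List.range_eq_range']
    simpa using h
  simp only [h1]
  have hsplit : List.range' 0 (ws.length + (pvExp ws).length)
      = List.range' 0 ws.length ++ List.range' ws.length (pvExp ws).length := by
    have := List.range'_append (s := 0) (m := ws.length) (n := (pvExp ws).length) (step := 1)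
    simpa using this.symm
  rw [List.length_append, pvRangeNat, List.range_eq_range']
  rw [hsplit, List.map_append, List.foldl_append]
  rw [loop2a ws (pvExp ws) ws 0 [] (by simp)]
  rw [loop2b ws (pvExp ws) (pvExp ws) ws.length _ le_rfl List.drop_left]
  rw [loop_alt ws [] []]
  have hfun : (fun w => String.ofList (pvCleanA w)) = pvCleanB := funext mk_cleanA_eq_cleanB
  simp only [List.nil_append, hfun]
  rw [pvExp, List.map_flatMap]

-- ===== VERDICT (by name: the statement is the Claim_ definition above) =====
theorem word_handler_spec : Claim_equal_word_handler := by
  intro text _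
  show word_handler text = word_handler_alt text
  exact main_eq (PySem.Chars.splitOn text.toList [' '])
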